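-- pv_equiv track=rewrite | github.com/asfag4191/Python | Koder/Løkker/lab3/find_factor.py | largest_factor_of
-- ===== SOURCE A (Python) =====
-- def largest_factor_of(x):
--     list=[]
--     for i in range(1,x):
--         if x % i == 0:
--             list.append(i)
--     if list:
--         return max(list) #må ha denne utfor løkken, hvis den er inni vil den avslutte iterasjonen med en gang et tall er funnet.
--     #når den plasseres utforbi kjøres hele funksjonen før løkken avsluttes. Før vi returnerer resultatet.
--     else:
--         return 1
-- ===== SOURCE B (Python) =====
-- def largest_factor_of(x):
--     # Largest proper divisor of x via smallest-prime-factor trial division (O(sqrt x)).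
--     if x < 2:
--         return 1
--     d = 2
--     while d * d <= x:
--         if x % d == 0:
--             return x // d
--         d += 1
--     return 1
-- ===== Notes on version B (the rewrite author's own statement) =====
-- stated objective: faster
-- what changed: Instead of collecting every divisor in 1..x-1 and taking max, B divides x by its smallest factor found by trial division up to sqrt(x).
import Mathlib
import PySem

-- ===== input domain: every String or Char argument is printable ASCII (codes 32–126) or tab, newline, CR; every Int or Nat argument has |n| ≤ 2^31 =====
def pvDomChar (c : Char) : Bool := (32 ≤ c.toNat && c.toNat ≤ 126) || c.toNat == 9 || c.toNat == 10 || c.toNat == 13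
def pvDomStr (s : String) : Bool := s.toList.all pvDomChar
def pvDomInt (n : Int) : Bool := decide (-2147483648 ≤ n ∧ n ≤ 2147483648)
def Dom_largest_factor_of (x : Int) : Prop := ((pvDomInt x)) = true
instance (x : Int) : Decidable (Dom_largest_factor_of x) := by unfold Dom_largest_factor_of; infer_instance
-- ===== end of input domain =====

-- B replaces A's scan of all of 1..x-1 with trial division up to sqrt(x): faster (asymptotic).

-- ===== PORT A =====
def largest_factor_of (x : Int) : Int :=
  let list := (PySem.List.pyRange 1 x 1).foldl
      (fun acc i => if PySem.Int.mod x i == 0 then acc ++ [i] else acc) []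
  if list ≠ [] then
    match PySem.List.max? list (fun y => y) with
    | some m => m
    | none => 1   -- unreachable: list ≠ []
  else 1

-- ===== PORT B =====
-- the 'while d * d <= x' loop of Source B; carries 2 ≤ d for termination
def lfLoop (x : Int) (d : Int) (hd : 2 ≤ d) : Int :=
  if h : d * d ≤ x then
    if PySem.Int.mod x d = 0 then PySem.Int.floordiv x d
    else lfLoop x (d + 1) (by omega)
  else 1
termination_by (x - d).toNat
decreasing_by
  have h2d : 2 * d ≤ d * d := by nlinarith
  omega

def largest_factor_of_alt (x : Int) : Int :=
  if x < 2 then 1 else lfLoop x 2 (by norm_num)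

-- ===== PRECONDITION & SPEC =====
def Spec_largest_factor_of (x : Int) (out : Int) : Prop := out = largest_factor_of_alt x
instance (x : Int) (out : Int) : Decidable (Spec_largest_factor_of x out) := by unfold Spec_largest_factor_of; infer_instance

-- ===== CLAIM (what is proved, stated in full; the proofs are below) =====
def Claim_equal_largest_factor_of : Prop := ∀ (x : Int), Dom_largest_factor_of x → Spec_largest_factor_of x (largest_factor_of x)

-- ===== LEMMAS AND PROOFS =====

-- the common value for x ≥ 2: x divided by its least prime factor
def pvM (x : Int) : Int := ((x.toNat / x.toNat.minFac : Nat) : Int)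

-- any proper divisor of n is at most n / minFac n
theorem pv_proper_div_le (n a : Nat) (h2 : 2 ≤ n) (hd : a ∣ n) (hlt : a < n) :
    a ≤ n / n.minFac := by
  obtain ⟨b, hb⟩ := hd
  have hb0 : b ≠ 0 := by rintro rfl; simp at hb; omega
  have hb1 : b ≠ 1 := by rintro rfl; simp at hb; omega
  have hbdvd : b ∣ n := ⟨a, by rw [hb, Nat.mul_comm]⟩
  have hmf : n.minFac ≤ b := Nat.minFac_le_of_dvd (by omega) hbdvd
  have ha : a = n / b := by
    rw [hb, Nat.mul_div_cancel]; omega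
  rw [ha]
  exact Nat.div_le_div_left hmf (Nat.minFac_pos n)

-- n / minFac n is itself a proper divisor, ≥ 1
theorem pv_m_facts (n : Nat) (h2 : 2 ≤ n) :
    (n / n.minFac) ∣ n ∧ 1 ≤ n / n.minFac ∧ n / n.minFac < n := by
  refine ⟨Nat.div_dvd_of_dvd (Nat.minFac_dvd n), ?_, ?_⟩
  · exact (Nat.one_le_div_iff (Nat.minFac_pos n)).2 (Nat.minFac_le (by omega))
  · exact Nat.div_lt_self (by omega) ((Nat.minFac_prime (by omega)).one_lt)

-- membership in A's divisor list
theorem pv_mem_list (x y : Int) :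
    y ∈ (PySem.List.pyRange 1 x 1).filter (fun i => PySem.Int.mod x i == 0) ↔
      (1 ≤ y ∧ y < x ∧ y ∣ x) := by
  simp [List.mem_filter, PySem.List.mem_pyRange_one, PySem.Int.mod_eq_zero_iff_dvd, and_assoc]

-- Int/Nat bridge: a positive Int divisor of x gives a Nat divisor of x.toNat, and back
theorem pv_A_eq (x : Int) (h2 : 2 ≤ x) : largest_factor_of x = pvM x := by
  have hfil : largest_factor_of x =
      (match PySem.List.max? ((PySem.List.pyRange 1 x 1).filter
          (fun i => PySem.Int.mod x i == 0)) (fun y => y) with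
        | some m => m | none => 1) := by
    unfold largest_factor_of
    rw [PySem.List.foldl_append_if_eq_filter]
    have h1 : (1 : Int) ∈ (PySem.List.pyRange 1 x 1).filter (fun i => PySem.Int.mod x i == 0) := by
      rw [pv_mem_list]; exact ⟨le_refl 1, by omega, one_dvd x⟩
    simp only [List.nil_append]
    rw [if_pos (by intro he; rw [he] at h1; exact absurd h1 (List.not_mem_nil))]
  rw [hfil]
  set L := (PySem.List.pyRange 1 x 1).filter (fun i => PySem.Int.mod x i == 0) with hL
  have h1 : (1 : Int) ∈ L := by rw [hL, pv_mem_list]; exact ⟨le_refl 1, by omega, one_dvd x⟩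
  obtain ⟨h, t, hht⟩ : ∃ h t, L = h :: t := by
    cases hLc : L with
    | nil => rw [hLc] at h1; exact absurd h1 (List.not_mem_nil)
    | cons a l => exact ⟨a, l, rfl⟩
  rw [hht, PySem.List.max?_id_cons]
  -- M := the running max; show M = pvM x
  set M := t.foldl max h with hM
  have hMmem : M ∈ L := by
    rw [hht]
    rcases PySem.List.foldl_max_mem t h with hc | hc
    · rw [hM, hc]; exact List.mem_cons_self
    · exact List.mem_cons_of_mem _ (by rw [hM]; exact hc)
  have hMmax : ∀ y ∈ L, y ≤ M := by
    intro y hy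
    rw [hht] at hy
    rcases List.mem_cons.1 hy with rfl | hy
    · exact (PySem.List.le_foldl_max t y).1
    · exact (PySem.List.le_foldl_max t h).2 y hy
  -- facts about M
  rw [hL, pv_mem_list] at hMmem
  obtain ⟨hM1, hMlt, hMdvd⟩ := hMmem
  have hN2 : 2 ≤ x.toNat := by omega
  have hxN : (x.toNat : Int) = x := by omega
  -- M ≤ pvM x
  have hle : M ≤ pvM x := by
    have hdN : M.toNat ∣ x.toNat := by
      rw [← Int.natCast_dvd_natCast]
      rw [Int.toNat_of_nonneg (by omega), hxN]; exact hMdvd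
    have := pv_proper_div_le x.toNat M.toNat hN2 hdN (by omega)
    unfold pvM; omega
  -- pvM x ≤ M
  have hge : pvM x ≤ M := by
    obtain ⟨hdvd', h1', hlt'⟩ := pv_m_facts x.toNat hN2
    apply hMmax
    rw [hL, pv_mem_list]
    refine ⟨by unfold pvM; omega, by unfold pvM; omega, ?_⟩
    unfold pvM
    rw [← hxN]
    exact Int.natCast_dvd_natCast.2 hdvd'
  show M = pvM x
  omega

theorem pv_B_loop_eq (x : Int) (h2x : 2 ≤ x) :
    ∀ (n : Nat) (d : Int) (hd : 2 ≤ d), (x - d).toNat = n →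
      (∀ e : Int, 2 ≤ e → e < d → ¬ e ∣ x) → lfLoop x d hd = pvM x := by
  intro n
  induction n using Nat.strong_induction_on with
  | _ n ih =>
    intro d hd hn hnd
    have hN2 : 2 ≤ x.toNat := by omega
    have hxN : (x.toNat : Int) = x := by omega
    have hmfd : (x.toNat.minFac : Int) ∣ x := by
      rw [← hxN]; exact Int.natCast_dvd_natCast.2 (Nat.minFac_dvd _)
    have hmf2 : 2 ≤ (x.toNat.minFac : Int) := by
      exact_mod_cast (Nat.minFac_prime (by omega)).two_le
    -- minFac is ≥ d: nothing below d divides x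
    have hdmf : d ≤ (x.toNat.minFac : Int) := by
      by_contra hlt
      exact hnd _ hmf2 (by omega) hmfd
    rw [lfLoop]
    split
    · rename_i hdx
      split
      · rename_i hmod
        -- d divides x, so d = minFac; return x // d
        have hddvd : d ∣ x := (PySem.Int.mod_eq_zero_iff_dvd x d).1 hmod
        have hdN : d.toNat ∣ x.toNat := by
          rw [← Int.natCast_dvd_natCast, Int.toNat_of_nonneg (by omega), hxN]; exact hddvd
        have hmfle : x.toNat.minFac ≤ d.toNat := Nat.minFac_le_of_dvd (by omega) hdN
        have hdeq : d = (x.toNat.minFac : Int) := by omega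
        rw [PySem.Int.floordiv_eq_ediv_of_pos (by omega), hdeq, ← hxN]
        unfold pvM
        exact_mod_cast rfl
      · rename_i hmod
        have hnd' : ∀ e : Int, 2 ≤ e → e < d + 1 → ¬ e ∣ x := by
          intro e he2 helt hedvd
          rcases lt_or_eq_of_le (by omega : e ≤ d) with h | h
          · exact hnd e he2 h hedvd
          · subst h; exact hmod ((PySem.Int.mod_eq_zero_iff_dvd x e).2 hedvd)
        have hdx2 : 2 * d ≤ d * d := by nlinarith
        exact ih (x - (d + 1)).toNat (by omega) (d + 1) (by omega) rfl hnd'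
    · rename_i hdx
      -- d*d > x and minFac ≥ d ⇒ minFac² > x ⇒ x prime ⇒ pvM x = 1
      have hp : x.toNat.Prime := by
        by_contra hnp
        have := Nat.minFac_sq_le_self (n := x.toNat) (by omega) hnp
        have hsq : (x.toNat.minFac : Int) * x.toNat.minFac ≤ x := by
          rw [← hxN]; exact_mod_cast (by nlinarith [this] : x.toNat.minFac * x.toNat.minFac ≤ x.toNat)
        nlinarith [hdmf, hmf2, hdx]
      unfold pvM
      rw [hp.minFac_eq, Nat.div_self (by omega)]
      simp

theorem pv_A_small (x : Int) (hx : x < 2) : largest_factor_of x = 1 := by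
  unfold largest_factor_of
  rw [PySem.List.pyRange_one_eq_nil (by omega)]
  simp

-- ===== VERDICT (by name: the statement is the Claim_ definition above) =====
theorem largest_factor_of_spec : Claim_equal_largest_factor_of := by
  intro x _
  unfold Spec_largest_factor_of largest_factor_of_alt
  by_cases h2 : x < 2
  · rw [if_pos h2, pv_A_small x h2]
  · rw [if_neg h2, pv_A_eq x (by omega),
        pv_B_loop_eq x (by omega) (x - 2).toNat 2 (by norm_num) rfl (by intro e he2 helt; omega)]
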